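-- pv_equiv track=rewrite | github.com/infected4098/Keyword-Abbreviation-model | preprocess.py | characters_extract
-- ===== SOURCE A (Python) =====
-- from itertools import permutations, combinations, product
--
-- def characters_extract(words):
--
--   splited_words = []
--   for word in words:
--     splited_words.append(word.split())
--
--   characters = []
--   for word in splited_words:
--     if len(word) == 1:
--       characters.append(word[0][0])
--     else:
--       characters.append([w[0] for w in word])
--
--   characters_permutation = list(product(*characters))
--
--   return characters_permutation
-- ===== SOURCE B (Python) =====
-- def characters_extract(words):
--     pools = [[t[0] for t in w.split()] for w in words]
--     total = 1
--     for p in pools: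
--         total *= len(p)
--     result = []
--     for r in range(total):
--         combo = []
--         for p in reversed(pools):
--             r, i = divmod(r, len(p))
--             combo.append(p[i])
--         combo.reverse()
--         result.append(tuple(combo))
--     return result
-- ===== Notes on version B (the rewrite author's own statement) =====
-- stated objective: alternative
-- what changed: B builds uniform first-letter pools in one comprehension, counts the total number of combinations, and decodes each result directly from its rank by mixed-radix divmod over the pools, instead of A's branching single-char/list representation fed to itertools.product.
import Mathlib
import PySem

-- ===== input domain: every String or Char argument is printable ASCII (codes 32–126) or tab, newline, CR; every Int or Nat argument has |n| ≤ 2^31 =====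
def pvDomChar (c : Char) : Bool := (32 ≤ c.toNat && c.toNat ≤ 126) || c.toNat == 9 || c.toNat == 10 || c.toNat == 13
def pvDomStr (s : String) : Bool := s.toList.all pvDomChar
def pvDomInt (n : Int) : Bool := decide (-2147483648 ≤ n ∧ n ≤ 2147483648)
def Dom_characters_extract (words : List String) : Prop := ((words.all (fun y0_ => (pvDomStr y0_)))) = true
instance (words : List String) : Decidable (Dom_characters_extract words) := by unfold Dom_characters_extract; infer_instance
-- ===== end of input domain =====

-- B replaces A's mixed str/list pools + itertools.product with uniform list pools and a
-- mixed-radix enumeration: each result is decoded from its rank by divmod (objective: alternative).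

-- ===== PORT A =====
-- w[0] in Python: the one-character string of the first character; "" is unreachable here
-- because tokens of .split() are nonempty.
def pvFirst (s : String) : String :=
  match PySem.Str.pyGet? s 0 with
  | some c => String.singleton c
  | none => ""

-- a pool in A is either a single-char string or a list of single-char strings;
-- itertools.product iterates a string as its characters
def pvIter (p : Sum String (List String)) : List String :=
  match p with
  | .inl s => s.toList.map (fun c => String.singleton c)
  | .inr l => l

-- itertools.product(*pools): last pool varies fastest
def pvProduct (pools : List (Sum String (List String))) : List (List String) :=
  match pools with
  | [] => [[]]
  | p :: rest => (pvIter p).flatMap (fun x => (pvProduct rest).map (fun t => x :: t))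

def characters_extract (words : List String) : List (List String) :=
  let splited_words := words.map (fun w => PySem.Str.split₀ w)
  let characters := splited_words.map (fun w =>
    if w.length == 1 then
      -- word[0][0]; the list access is guaranteed in range by the branch condition
      Sum.inl (pvFirst ((PySem.List.pyGet? w 0).getD ""))
    else
      Sum.inr (w.map pvFirst))
  pvProduct characters

-- ===== PORT B =====
-- p[i]; in range whenever total > 0, so the "" default is unreachable
def pvPget (p : List String) (i : Nat) : String := (PySem.List.pyGet? p (i : Int)).getD ""

def characters_extract_alt (words : List String) : List (List String) :=
  let pools := words.map (fun w => (PySem.Str.split₀ w).map pvFirst)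
  let total := pools.foldl (fun t p => t * p.length) 1
  (List.range total).map (fun r =>
    ((pools.reverse.foldl
        (fun (st : Nat × List String) p => (st.1 / p.length, st.2 ++ [pvPget p (st.1 % p.length)]))
        (r, [])).2).reverse)

-- ===== PRECONDITION & SPEC =====
def Spec_characters_extract (words : List String) (out : List (List String)) : Prop := out = characters_extract_alt words
instance (words : List String) (out : List (List String)) : Decidable (Spec_characters_extract words out) := by unfold Spec_characters_extract; infer_instance

-- ===== CLAIM (what is proved, stated in full; the proofs are below) =====
def Claim_equal_characters_extract : Prop := ∀ (words : List String), Dom_characters_extract words → Spec_characters_extract words (characters_extract words)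

-- ===== LEMMAS AND PROOFS =====

-- uniform product on plain list pools
def pvProdL (pools : List (List String)) : List (List String) :=
  match pools with
  | [] => [[]]
  | p :: rest => p.flatMap (fun x => (pvProdL rest).map (fun t => x :: t))

theorem pvProduct_eq_prodL (pools : List (Sum String (List String))) :
    pvProduct pools = pvProdL (pools.map pvIter) := by
  induction pools with
  | nil => rfl
  | cons p rest ih => simp [pvProduct, pvProdL, ih]

-- every token of .split() is nonempty
theorem split₀_go_ne_nil : ∀ (s cur : List Char) (acc : List (List Char)),
    (∀ t ∈ acc, t ≠ []) → ∀ t ∈ PySem.Chars.split₀.go s cur acc, t ≠ [] := by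
  intro s
  induction s with
  | nil =>
    intro cur acc hacc t ht
    simp only [PySem.Chars.split₀.go] at ht
    split at ht
    · exact hacc t (by simpa using ht)
    · rename_i hcur
      simp only [List.mem_reverse, List.mem_cons] at ht
      rcases ht with h | h
      · subst h; simpa [List.isEmpty_iff] using hcur
      · exact hacc t h
  | cons c rest ih =>
    intro cur acc hacc t ht
    simp only [PySem.Chars.split₀.go] at ht
    split at ht
    · split at ht
      · exact ih [] acc hacc t ht
      · rename_i hcur
        refine ih [] (cur.reverse :: acc) ?_ t ht
        intro u hu
        rcases List.mem_cons.mp hu with h | h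
        · subst h; simpa [List.isEmpty_iff] using hcur
        · exact hacc u h
    · exact ih (c :: cur) acc hacc t ht

theorem token_ne_empty (w t : String) (ht : t ∈ PySem.Str.split₀ w) : t.toList ≠ [] := by
  simp only [PySem.Str.split₀, List.mem_map] at ht
  obtain ⟨cs, hcs, rfl⟩ := ht
  have := split₀_go_ne_nil w.toList [] [] (by simp) cs hcs
  simpa using this

-- A's pool for a word, iterated, is B's pool for that word
theorem pool_eq (w : String) :
    pvIter (if (PySem.Str.split₀ w).length == 1 then
              Sum.inl (pvFirst ((PySem.List.pyGet? (PySem.Str.split₀ w) 0).getD ""))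
            else Sum.inr ((PySem.Str.split₀ w).map pvFirst))
      = (PySem.Str.split₀ w).map pvFirst := by
  by_cases h : (PySem.Str.split₀ w).length = 1
  · obtain ⟨t, ht⟩ := List.length_eq_one_iff.mp h
    have htok : t.toList ≠ [] := token_ne_empty w t (by simp [ht])
    obtain ⟨c, cs, hc⟩ := List.exists_cons_of_ne_nil htok
    simp [ht, pvIter, pvFirst, PySem.Str.pyGet?, PySem.Chars.pyGet?, PySem.List.pyGet?,
      PySem.List.pyIdx?, hc, String.singleton]
  · simp [h, pvIter]

-- number of combinations contributed by a list of pools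
def pvLen (pools : List (List String)) : Nat :=
  match pools with
  | [] => 1
  | p :: rest => p.length * pvLen rest

-- head-recursive mixed-radix decoding of rank r
def pvDec (pools : List (List String)) (r : Nat) : List String :=
  match pools with
  | [] => []
  | p :: rest => pvPget p ((r / pvLen rest) % p.length) :: pvDec rest r

theorem foldl_mul_len (pools : List (List String)) : ∀ (init : Nat),
    pools.foldl (fun t p => t * p.length) init = init * pvLen pools := by
  induction pools with
  | nil => intro init; simp [pvLen]
  | cons p rest ih => intro init; simp [pvLen, ih, Nat.mul_assoc]

theorem foldl_dec (pools : List (List String)) : ∀ (r : Nat) (c : List String),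
    pools.reverse.foldl
        (fun (st : Nat × List String) p => (st.1 / p.length, st.2 ++ [pvPget p (st.1 % p.length)]))
        (r, c)
      = (r / pvLen pools, c ++ (pvDec pools r).reverse) := by
  induction pools with
  | nil => intro r c; simp [pvLen, pvDec]
  | cons p rest ih =>
    intro r c
    simp only [List.reverse_cons, List.foldl_append, ih, List.foldl_cons, List.foldl_nil]
    simp only [Prod.mk.injEq]
    constructor
    · simp [pvLen, Nat.div_div_eq_div_mul, Nat.mul_comm]
    · simp [pvDec]

theorem pvDec_period (pools : List (List String)) : ∀ (q r : Nat),
    pvDec pools (q * pvLen pools + r) = pvDec pools r := by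
  induction pools with
  | nil => intro q r; simp [pvDec]
  | cons p rest ih =>
    intro q r
    have htail : pvDec rest (q * (p.length * pvLen rest) + r) = pvDec rest r := by
      have h : q * (p.length * pvLen rest) + r = (q * p.length) * pvLen rest + r := by ring
      rw [h, ih]
    by_cases hT : pvLen rest = 0
    · simp only [pvDec, pvLen]
      rw [htail]
      simp [hT]
    · have hT' : 0 < pvLen rest := Nat.pos_of_ne_zero hT
      simp only [pvDec, pvLen]
      rw [htail]
      have h1 : q * (p.length * pvLen rest) + r = r + (q * p.length) * pvLen rest := by ring
      rw [h1, Nat.add_mul_div_right _ _ hT', Nat.add_mul_mod_self_right]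

theorem range_mul_flatMap (a T : Nat) :
    List.range (a * T) = (List.range a).flatMap (fun q => (List.range T).map (fun s => q * T + s)) := by
  induction a with
  | zero => simp
  | succ a ih =>
    rw [Nat.succ_mul, List.range_add, ih, List.range_succ]
    simp

-- any list is the range of its indices read through pvPget
theorem flatMap_eq_range (p : List String) (g : String → List (List String)) :
    p.flatMap g = (List.range p.length).flatMap (fun q => g (pvPget p q)) := by
  have hp : p = (List.range p.length).map (fun q => pvPget p q) := by
    refine List.ext_getElem (by simp) fun i h1 h2 => ?_
    simp only [List.getElem_map, List.getElem_range, pvPget, PySem.List.pyGet?_natCast]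
    rw [List.getElem?_eq_getElem h1]
    rfl
  conv_lhs => rw [hp]
  rw [List.flatMap_map]

theorem prodL_eq_dec (pools : List (List String)) :
    pvProdL pools = (List.range (pvLen pools)).map (pvDec pools) := by
  induction pools with
  | nil => simp [pvProdL, pvLen, pvDec, List.range_succ]
  | cons p rest ih =>
    simp only [pvProdL, pvLen]
    rw [flatMap_eq_range p (fun x => (pvProdL rest).map (fun t => x :: t))]
    rw [ih, range_mul_flatMap p.length (pvLen rest), List.map_flatMap]
    rw [List.flatMap_def, List.flatMap_def]
    congr 1
    apply List.map_congr_left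
    intro q hq
    rw [List.mem_range] at hq
    simp only [List.map_map]
    apply List.map_congr_left
    intro t ht
    rw [List.mem_range] at ht
    have hT : 0 < pvLen rest := Nat.pos_of_ne_zero (by omega)
    simp only [Function.comp_apply, pvDec]
    have h1 : (q * pvLen rest + t) / pvLen rest = q := by
      rw [Nat.add_comm, Nat.add_mul_div_right _ _ hT, Nat.div_eq_of_lt ht]; omega
    have h2 : pvDec rest (q * pvLen rest + t) = pvDec rest t := pvDec_period rest q t
    rw [h1, h2, Nat.mod_eq_of_lt hq]

-- ===== VERDICT (by name: the statement is the Claim_ definition above) =====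
theorem characters_extract_spec : Claim_equal_characters_extract := by
  intro words _
  unfold Spec_characters_extract characters_extract characters_extract_alt
  rw [pvProduct_eq_prodL]
  simp only [foldl_mul_len, Nat.one_mul, foldl_dec, List.nil_append, List.reverse_reverse]
  rw [← prodL_eq_dec]
  simp only [List.map_map]
  refine congrArg pvProdL (List.map_congr_left ?_)
  intro w _
  simpa [Function.comp_def] using pool_eq w
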